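-- pv_equiv track=rewrite | github.com/onyuki/1400-zadach-po-programmirivaniu | 5.1-5.43.py | last_n_digits_sum_prod_5_41
-- ===== SOURCE A (Python) =====
-- def last_n_digits_sum_prod_5_41(number, n):
--     if n <= 0:
--         return 0, 1
--     m = abs(int(number))
--     s = 0
--     prod = 1
--     for i in range(n):
--         d = m % 10
--         s += d
--         prod *= d
--         m //= 10
--     return s, prod
-- ===== SOURCE B (Python) =====
-- def last_n_digits_sum_prod_5_41(number, n):
--     if n <= 0:
--         return 0, 1
--     m = abs(int(number))
--     digits = []
--     while m > 0:
--         digits.append(m % 10)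
--         m //= 10
--     digits = digits[:n]
--     s = sum(digits)
--     p = 1
--     for d in digits:
--         p *= d
--     if n > len(digits):
--         p = 0
--     return s, p
-- ===== Notes on version B (the rewrite author's own statement) =====
-- stated objective: faster
-- what changed: B materialises the digit list once with a while-loop that stops when the number is exhausted, truncates it to n, aggregates sum/product over that list, and sets the product to 0 when fewer than n real digits exist (the zero padding), instead of A's fixed for-loop that runs exactly n mod/div steps even after the number reaches 0.
import Mathlib
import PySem

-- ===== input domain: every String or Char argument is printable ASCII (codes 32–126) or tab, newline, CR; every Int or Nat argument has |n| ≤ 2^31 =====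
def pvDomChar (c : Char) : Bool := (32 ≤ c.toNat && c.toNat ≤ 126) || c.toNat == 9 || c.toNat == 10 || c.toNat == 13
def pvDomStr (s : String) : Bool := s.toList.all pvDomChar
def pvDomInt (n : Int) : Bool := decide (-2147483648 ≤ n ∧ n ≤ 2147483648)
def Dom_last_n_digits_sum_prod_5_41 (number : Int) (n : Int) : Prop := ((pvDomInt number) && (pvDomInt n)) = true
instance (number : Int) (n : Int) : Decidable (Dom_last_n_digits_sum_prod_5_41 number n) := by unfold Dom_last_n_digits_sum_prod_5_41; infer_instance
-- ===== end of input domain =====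

-- B builds the digit list once, stopping when the number is exhausted, then aggregates;
-- A always performs exactly n mod/div steps. Return values agree everywhere; objective: faster
-- when n exceeds the digit count (a timing run's measurement is the authority on 'faster').

-- ===== PORT A =====
def last_n_digits_sum_prod_5_41 (number : Int) (n : Int) : Int × Int :=
  if n ≤ 0 then (0, 1)
  else
    let r := (PySem.List.pyRange 0 n 1).foldl
      (fun (st : Int × Int × Int) _ =>
        let d := PySem.Int.mod st.2.2 10
        (st.1 + d, st.2.1 * d, PySem.Int.floordiv st.2.2 10))
      (0, 1, |number|)
    (r.1, r.2.1)

-- ===== PORT B =====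
-- the 'while m > 0: digits.append(m % 10); m //= 10' loop of Source B
theorem pyDigits_dec (m : Int) (h : 0 < m) :
    (PySem.Int.floordiv m 10).toNat < m.toNat := by
  rw [PySem.Int.floordiv_eq_ediv_of_pos (by norm_num)]
  omega

def pyDigits (m : Int) : List Int :=
  if h : 0 < m then PySem.Int.mod m 10 :: pyDigits (PySem.Int.floordiv m 10) else []
termination_by m.toNat
decreasing_by exact pyDigits_dec m h

def last_n_digits_sum_prod_5_41_alt (number : Int) (n : Int) : Int × Int :=
  if n ≤ 0 then (0, 1)
  else
    let ds := PySem.List.slice (pyDigits |number|) none (some n)   -- digits[:n]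
    let s := ds.foldl (· + ·) 0                                    -- sum(digits)
    let p := ds.foldl (· * ·) 1                                    -- for d in digits: p *= d
    if n > (ds.length : Int) then (s, 0) else (s, p)

-- ===== PRECONDITION & SPEC =====
def Spec_last_n_digits_sum_prod_5_41 (number : Int) (n : Int) (out : Int × Int) : Prop := out = last_n_digits_sum_prod_5_41_alt number n
instance (number : Int) (n : Int) (out : Int × Int) : Decidable (Spec_last_n_digits_sum_prod_5_41 number n out) := by unfold Spec_last_n_digits_sum_prod_5_41; infer_instance

-- ===== CLAIM (what is proved, stated in full; the proofs are below) =====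
def Claim_equal_last_n_digits_sum_prod_5_41 : Prop := ∀ (number : Int) (n : Int), Dom_last_n_digits_sum_prod_5_41 number n → Spec_last_n_digits_sum_prod_5_41 number n (last_n_digits_sum_prod_5_41 number n)

-- ===== LEMMAS AND PROOFS =====

-- the digit list A's loop effectively consumes: exactly k digits, low-order first
def dl (k : Nat) (m : Int) : List Int :=
  match k with
  | 0 => []
  | k + 1 => PySem.Int.mod m 10 :: dl k (PySem.Int.floordiv m 10)

theorem floordiv_ten_nonneg (m : Int) (h : 0 ≤ m) : 0 ≤ PySem.Int.floordiv m 10 := by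
  rw [PySem.Int.floordiv_eq_ediv_of_pos (by norm_num)]
  exact Int.ediv_nonneg h (by norm_num)

-- A's fold, run over ANY list of length k (the elements are ignored), in terms of dl
theorem foldA_eq (l : List Int) : ∀ (s p m : Int),
    l.foldl (fun (st : Int × Int × Int) _ =>
        let d := PySem.Int.mod st.2.2 10
        (st.1 + d, st.2.1 * d, PySem.Int.floordiv st.2.2 10)) (s, p, m)
      = (s + (dl l.length m).sum, p * (dl l.length m).prod,
         (l.foldl (fun (st : Int × Int × Int) _ =>
            let d := PySem.Int.mod st.2.2 10
            (st.1 + d, st.2.1 * d, PySem.Int.floordiv st.2.2 10)) (s, p, m)).2.2) := by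
  induction l with
  | nil => intro s p m; simp [dl]
  | cons a t ih =>
      intro s p m
      simp only [List.foldl_cons, List.length_cons, dl, List.sum_cons, List.prod_cons]
      rw [ih]
      ring_nf

-- dl is pyDigits truncated to k and right-padded with zeros up to length k
theorem dl_eq_pyDigits (k : Nat) : ∀ (m : Int), 0 ≤ m →
    dl k m = (pyDigits m).take k ++ List.replicate (k - (pyDigits m).length) 0 := by
  induction k with
  | zero => intro m _; simp [dl]
  | succ k ih =>
      intro m hm
      rcases lt_or_eq_of_le hm with hpos | hz
      · rw [dl, pyDigits, dif_pos hpos]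
        rw [ih _ (floordiv_ten_nonneg m hpos.le)]
        simp [List.take_succ_cons]
      · rw [dl, pyDigits, dif_neg (by omega)]
        have h10 : PySem.Int.mod 0 10 = 0 := by decide
        have hd : PySem.Int.floordiv 0 10 = 0 := by decide
        rw [← hz] at *
        rw [h10, hd, ih 0 le_rfl]
        simp [pyDigits, List.replicate_succ]

theorem sum_pad (ds : List Int) (j : Nat) : (ds ++ List.replicate j 0).sum = ds.sum := by
  simp

theorem prod_pad_pos (ds : List Int) (j : Nat) (hj : 0 < j) :
    (ds ++ List.replicate j 0).prod = 0 := by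
  cases j with
  | zero => omega
  | succ j => simp [List.replicate_succ]

theorem foldl_add_eq_sum (l : List Int) : l.foldl (· + ·) 0 = l.sum := by
  simp [List.sum_eq_foldl]

theorem foldl_mul_eq_prod (l : List Int) : ∀ s : Int, l.foldl (· * ·) s = s * l.prod := by
  induction l with
  | nil => intro s; simp
  | cons a t ih => intro s; simp only [List.foldl_cons, List.prod_cons]; rw [ih]; ring

-- ===== VERDICT (by name: the statement is the Claim_ definition above) =====
theorem last_n_digits_sum_prod_5_41_spec : Claim_equal_last_n_digits_sum_prod_5_41 := by
  intro number n _
  unfold Spec_last_n_digits_sum_prod_5_41 last_n_digits_sum_prod_5_41 last_n_digits_sum_prod_5_41_alt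
  by_cases hn : n ≤ 0
  · simp [hn]
  · simp only [if_neg hn]
    have hn0 : 0 ≤ n := by omega
    set m := |number| with hmdef
    have hm : 0 ≤ m := abs_nonneg _
    set pd := pyDigits m with hpd
    set k := n.toNat with hk
    have hlen : (PySem.List.pyRange 0 n 1).length = k := by
      rw [PySem.List.length_pyRange_one]; omega
    rw [foldA_eq, hlen, dl_eq_pyDigits k m hm, ← hpd]
    have hslice : PySem.List.slice pd none (some n) = pd.take k := by
      rw [PySem.List.slice_to _ hn0]
    rw [hslice, foldl_add_eq_sum, foldl_mul_eq_prod, sum_pad]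
    by_cases hle : k ≤ pd.length
    · have hrep : k - pd.length = 0 := by omega
      have hlen2 : (pd.take k).length = k := by simp [hle]
      rw [hrep, if_neg (by rw [hlen2]; omega)]
      simp
    · have htake : pd.take k = pd := List.take_of_length_le (by omega)
      rw [if_pos (by rw [htake]; omega)]
      rw [prod_pad_pos _ _ (by omega)]
      simp
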